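-- pv_equiv track=rewrite | github.com/arun-wpm/mit-news-classify | Arun/Wang_et_al/wang_embed.py | transform_labels
-- ===== SOURCE A (Python) =====
-- def transform_labels(in_labels):
--     # from the input labels, in the format of list of list of labels pertaining to document at row i,
--     # output a multilabel matrix where row i column j is 1 if document i contains label j and 0 otherwise
--     label_to_id = {}
--     id_to_label = {}
--     cnt = 0
--     label_matrix = []
--     for row in in_labels:
--         label_matrix.append([])
--         for label in row:
--             if label not in label_to_id:
--                 label_to_id[label] = cnt
--                 id_to_label[cnt] = label
--                 cnt += 1
--             i = label_to_id[label]
--             if i >= len(label_matrix[-1]):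
--                 label_matrix[-1].extend([0]*(i + 1 - len(label_matrix[-1])))
--             label_matrix[-1][i] = 1
--
--     for i in range(len(label_matrix)):
--         if len(label_matrix[i]) < len(label_to_id):
--             label_matrix[i].extend([0]*(len(label_to_id) - len(label_matrix[i])))
--
--     return label_matrix, id_to_label
-- ===== SOURCE B (Python) =====
-- def transform_labels(in_labels):
--     # Pass 1: assign ids to labels in first-appearance order.
--     label_to_id = {}
--     id_to_label = {}
--     cnt = 0
--     for row in in_labels:
--         for label in row:
--             if label not in label_to_id:
--                 label_to_id[label] = cnt
--                 id_to_label[cnt] = label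
--                 cnt += 1
--     # Pass 2: build each row as a pre-sized 0/1 vector (no dynamic growth, no padding pass).
--     label_matrix = []
--     for row in in_labels:
--         vec = [0] * cnt
--         for label in row:
--             vec[label_to_id[label]] = 1
--         label_matrix.append(vec)
--     return label_matrix, id_to_label
-- ===== Notes on version B (the rewrite author's own statement) =====
-- stated objective: simpler
-- what changed: B separates the work into two passes: one pass that only builds the label-id dictionaries, then a second pass that emits each row as a pre-sized [0]*n vector, eliminating A's on-the-fly row extension and its trailing padding loop.
import Mathlib
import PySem

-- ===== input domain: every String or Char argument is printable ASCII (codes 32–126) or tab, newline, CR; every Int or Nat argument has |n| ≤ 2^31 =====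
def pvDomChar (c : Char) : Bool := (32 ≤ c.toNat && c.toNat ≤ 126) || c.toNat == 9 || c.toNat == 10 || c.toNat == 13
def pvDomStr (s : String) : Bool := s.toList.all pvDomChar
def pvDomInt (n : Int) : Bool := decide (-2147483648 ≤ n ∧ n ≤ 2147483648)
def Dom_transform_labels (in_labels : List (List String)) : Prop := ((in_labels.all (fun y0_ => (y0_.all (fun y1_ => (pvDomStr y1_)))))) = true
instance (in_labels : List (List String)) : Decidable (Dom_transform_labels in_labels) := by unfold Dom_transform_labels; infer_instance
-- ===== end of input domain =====

-- B splits A's single pass into a dictionary pass plus a matrix pass with pre-sized rows,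
-- dropping A's dynamic row extension and trailing padding loop (objective: simpler).


-- ===== PORT A =====
-- inner loop of A: mutates the dicts, the counter, and the current (last) matrix row
def aRow (ltid : PySem.Dict String Int) (idtl : PySem.Dict Int String) (cnt : Int)
    (cur : List Int) :
    List String → PySem.Dict String Int × PySem.Dict Int String × Int × List Int
  | [] => (ltid, idtl, cnt, cur)
  | label :: rest =>
    let s :=
      if ¬ (ltid.contains label) then (ltid.insert label cnt, idtl.insert cnt label, cnt + 1)
      else (ltid, idtl, cnt)
    let i := s.1.getD label 0
    let cur' := if (cur.length : Int) ≤ i then cur ++ List.replicate (i + 1 - cur.length).toNat 0 else cur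
    aRow s.1 s.2.1 s.2.2 (cur'.set i.toNat 1) rest

-- outer loop of A: appends one (possibly short) row per input row
def aRows (ltid : PySem.Dict String Int) (idtl : PySem.Dict Int String) (cnt : Int)
    (mat : List (List Int)) :
    List (List String) → PySem.Dict String Int × PySem.Dict Int String × Int × List (List Int)
  | [] => (ltid, idtl, cnt, mat)
  | row :: rest =>
    let s := aRow ltid idtl cnt [] row
    aRows s.1 s.2.1 s.2.2.1 (mat ++ [s.2.2.2]) rest

def transform_labels (in_labels : List (List String)) : List (List Int) × (List (Int × String)) :=
  let s := aRows PySem.Dict.empty PySem.Dict.empty 0 [] in_labels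
  -- final padding loop: pad every row to len(label_to_id)
  (s.2.2.2.map (fun r =>
      if r.length < s.1.size then r ++ List.replicate (s.1.size - r.length) 0 else r),
   s.2.1.items)

-- ===== PORT B =====
-- B pass 1 (inner loop): only builds the dictionaries and the counter
def bDictRow (ltid : PySem.Dict String Int) (idtl : PySem.Dict Int String) (cnt : Int) :
    List String → PySem.Dict String Int × PySem.Dict Int String × Int
  | [] => (ltid, idtl, cnt)
  | label :: rest =>
    if ¬ (ltid.contains label) then
      bDictRow (ltid.insert label cnt) (idtl.insert cnt label) (cnt + 1) rest
    else bDictRow ltid idtl cnt rest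

-- B pass 1 (outer loop)
def bDict (ltid : PySem.Dict String Int) (idtl : PySem.Dict Int String) (cnt : Int) :
    List (List String) → PySem.Dict String Int × PySem.Dict Int String × Int
  | [] => (ltid, idtl, cnt)
  | row :: rest =>
    let s := bDictRow ltid idtl cnt row
    bDict s.1 s.2.1 s.2.2 rest

-- B pass 2 inner loop: set the 1s in a pre-sized vector
def bVec (ltid : PySem.Dict String Int) (vec : List Int) : List String → List Int
  | [] => vec
  | label :: rest => bVec ltid (vec.set (ltid.getD label 0).toNat 1) rest

def transform_labels_alt (in_labels : List (List String)) : List (List Int) × (List (Int × String)) :=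
  let s := bDict PySem.Dict.empty PySem.Dict.empty 0 in_labels
  (in_labels.map (fun row => bVec s.1 (List.replicate s.2.2.toNat 0) row), s.2.1.items)

-- ===== PRECONDITION & SPEC =====
def Spec_transform_labels (in_labels : List (List String)) (out : List (List Int) × (List (Int × String))) : Prop := out = transform_labels_alt in_labels
instance (in_labels : List (List String)) (out : List (List Int) × (List (Int × String))) : Decidable (Spec_transform_labels in_labels out) := by unfold Spec_transform_labels; infer_instance

-- ===== CLAIM (what is proved, stated in full; the proofs are below) =====
def Claim_equal_transform_labels : Prop := ∀ (in_labels : List (List String)), Dom_transform_labels in_labels → Spec_transform_labels in_labels (transform_labels in_labels)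

-- ===== LEMMAS AND PROOFS =====

-- proof-only helpers
def padTo (n : Nat) (r : List Int) : List Int := r ++ List.replicate (n - r.length) 0

def pvInv (ltid : PySem.Dict String Int) (cnt : Int) : Prop :=
  0 ≤ cnt ∧ ltid.size = cnt.toNat ∧
  ∀ l, ltid.contains l = true → 0 ≤ ltid.getD l 0 ∧ ltid.getD l 0 < cnt

def pvExt (ltid ltid' : PySem.Dict String Int) (cnt cnt' : Int) : Prop :=
  cnt ≤ cnt' ∧
  ∀ l, ltid.contains l = true → ltid'.contains l = true ∧ ltid'.getD l 0 = ltid.getD l 0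

theorem pvExt_refl (ltid : PySem.Dict String Int) (cnt : Int) : pvExt ltid ltid cnt cnt :=
  ⟨le_refl _, fun _ h => ⟨h, rfl⟩⟩

theorem pvExt_trans {l1 l2 l3 : PySem.Dict String Int} {c1 c2 c3 : Int}
    (h1 : pvExt l1 l2 c1 c2) (h2 : pvExt l2 l3 c2 c3) : pvExt l1 l3 c1 c3 := by
  refine ⟨le_trans h1.1 h2.1, fun l hl => ?_⟩
  obtain ⟨hc2, hg2⟩ := h1.2 l hl
  obtain ⟨hc3, hg3⟩ := h2.2 l hc2
  exact ⟨hc3, hg3.trans hg2⟩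

theorem pvInv_insert (ltid : PySem.Dict String Int) (cnt : Int) (l : String)
    (h : pvInv ltid cnt) (hl : ltid.contains l = false) :
    pvInv (ltid.insert l cnt) (cnt + 1) := by
  obtain ⟨h0, hs, hv⟩ := h
  refine ⟨by omega, ?_, fun l' hl' => ?_⟩
  · rw [PySem.Dict.size_insert, hl]; simp; omega
  · rw [PySem.Dict.contains_insert] at hl'
    rcases eq_or_ne l' l with rfl | hne
    · rw [PySem.Dict.getD_insert_self]; omega
    · simp [hne] at hl'
      rw [PySem.Dict.getD_insert_of_ne _ _ _ hne]
      have := hv l' hl'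
      omega

theorem pvExt_insert (ltid : PySem.Dict String Int) (cnt : Int) (l : String)
    (hl : ltid.contains l = false) :
    pvExt ltid (ltid.insert l cnt) cnt (cnt + 1) := by
  refine ⟨by omega, fun l' hl' => ?_⟩
  have hne : l' ≠ l := by rintro rfl; rw [hl'] at hl; exact absurd hl (by simp)
  rw [PySem.Dict.contains_insert, PySem.Dict.getD_insert_of_ne _ _ _ hne]
  simp [hl']

theorem aRow_dicts (row : List String) (ltid : PySem.Dict String Int) (idtl : PySem.Dict Int String) (cnt : Int) (cur : List Int) :
    ((aRow ltid idtl cnt cur row).1, (aRow ltid idtl cnt cur row).2.1,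
      (aRow ltid idtl cnt cur row).2.2.1) = bDictRow ltid idtl cnt row := by
  induction row generalizing ltid idtl cnt cur with
  | nil => simp [aRow, bDictRow]
  | cons l rest ih =>
    by_cases h : ltid.contains l = true <;>
      simp [aRow, bDictRow, h, ih]

theorem bDictRow_inv (row : List String) (ltid : PySem.Dict String Int) (idtl : PySem.Dict Int String) (cnt : Int) (h : pvInv ltid cnt) :
    pvInv (bDictRow ltid idtl cnt row).1 (bDictRow ltid idtl cnt row).2.2 := by
  induction row generalizing ltid idtl cnt with
  | nil => exact h
  | cons l rest ih =>
    by_cases hc : ltid.contains l = true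
    · simpa [bDictRow, hc] using ih _ _ _ h
    · have hf : ltid.contains l = false := by simpa using hc
      simpa [bDictRow, hf] using ih _ _ _ (pvInv_insert _ _ _ h hf)

theorem bDictRow_ext (row : List String) (ltid : PySem.Dict String Int) (idtl : PySem.Dict Int String) (cnt : Int) :
    pvExt ltid (bDictRow ltid idtl cnt row).1 cnt (bDictRow ltid idtl cnt row).2.2 := by
  induction row generalizing ltid idtl cnt with
  | nil => exact pvExt_refl _ _
  | cons l rest ih =>
    by_cases hc : ltid.contains l = true
    · simpa [bDictRow, hc] using ih ltid idtl cnt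
    · have hf : ltid.contains l = false := by simpa using hc
      have := pvExt_trans (pvExt_insert ltid cnt l hf)
        (ih (ltid.insert l cnt) (idtl.insert cnt l) (cnt + 1))
      simpa [bDictRow, hf] using this

theorem bDictRow_contains (row : List String) (ltid : PySem.Dict String Int) (idtl : PySem.Dict Int String) (cnt : Int) (l : String) (hl : l ∈ row) :
    (bDictRow ltid idtl cnt row).1.contains l = true := by
  induction row generalizing ltid idtl cnt with
  | nil => cases hl
  | cons a rest ih =>
    rcases List.mem_cons.1 hl with rfl | hmem
    · by_cases hc : ltid.contains l = true
      · rw [bDictRow, if_neg (by simp [hc])]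
        exact ((bDictRow_ext rest ltid idtl cnt).2 l hc).1
      · have hf : ltid.contains l = false := by simpa using hc
        rw [bDictRow, if_pos (by simp [hf])]
        exact ((bDictRow_ext rest _ _ _).2 l (PySem.Dict.contains_insert_self _ _ _)).1
    · by_cases hc : ltid.contains a = true <;>
        [skip; have hf : ltid.contains a = false := by simpa using hc] <;>
        simp [bDictRow, *]

theorem bDict_inv (rows : List (List String)) (ltid : PySem.Dict String Int) (idtl : PySem.Dict Int String) (cnt : Int) (h : pvInv ltid cnt) :
    pvInv (bDict ltid idtl cnt rows).1 (bDict ltid idtl cnt rows).2.2 := by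
  induction rows generalizing ltid idtl cnt with
  | nil => exact h
  | cons row rest ih => exact ih _ _ _ (bDictRow_inv row _ _ _ h)

theorem bDict_ext (rows : List (List String)) (ltid : PySem.Dict String Int) (idtl : PySem.Dict Int String) (cnt : Int) :
    pvExt ltid (bDict ltid idtl cnt rows).1 cnt (bDict ltid idtl cnt rows).2.2 := by
  induction rows generalizing ltid idtl cnt with
  | nil => exact pvExt_refl _ _
  | cons row rest ih => exact pvExt_trans (bDictRow_ext row ltid idtl cnt) (ih _ _ _)

theorem bVec_congr (row : List String) (d d' : PySem.Dict String Int) (v : List Int)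
    (h : ∀ l ∈ row, d.getD l 0 = d'.getD l 0) : bVec d v row = bVec d' v row := by
  induction row generalizing v with
  | nil => rfl
  | cons l rest ih =>
    rw [bVec, bVec, h l (List.mem_cons_self ..)]
    exact ih _ (fun x hx => h x (List.mem_cons_of_mem _ hx))

theorem padTo_set (N : Nat) (cur : List Int) (i : Int) (h0 : 0 ≤ i) (hi : i.toNat < N)
    (hc : cur.length ≤ N) :
    padTo N ((if (cur.length : Int) ≤ i then cur ++ List.replicate (i + 1 - cur.length).toNat 0 else cur).set i.toNat 1)
      = (padTo N cur).set i.toNat 1 := by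
  by_cases hle : (cur.length : Int) ≤ i
  · rw [if_pos hle]
    apply List.ext_getElem
    · simp only [padTo, List.length_append, List.length_set, List.length_replicate]; omega
    · intro n h1 h2
      simp only [padTo, List.getElem_append, List.getElem_set, List.length_set,
        List.length_append, List.length_replicate, List.getElem_replicate]
      split_ifs <;> first | rfl | omega
  · rw [if_neg hle]
    apply List.ext_getElem
    · simp only [padTo, List.length_append, List.length_set, List.length_replicate]
    · intro n h1 h2
      simp only [padTo, List.getElem_append, List.getElem_set, List.length_set,
        List.getElem_replicate]
      split_ifs <;> first | rfl | omega

theorem aRow_main (row : List String) (ltid : PySem.Dict String Int) (idtl : PySem.Dict Int String) (cnt : Int) (cur : List Int) (h : pvInv ltid cnt)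
    (hc : cur.length ≤ cnt.toNat) :
    (aRow ltid idtl cnt cur row).2.2.2.length ≤ (bDictRow ltid idtl cnt row).2.2.toNat ∧
    ∀ N, (bDictRow ltid idtl cnt row).2.2.toNat ≤ N →
      padTo N (aRow ltid idtl cnt cur row).2.2.2
        = bVec (bDictRow ltid idtl cnt row).1 (padTo N cur) row := by
  induction row generalizing ltid idtl cnt cur with
  | nil => exact ⟨hc, fun N _ => rfl⟩
  | cons l rest ih =>
    by_cases hcon : ltid.contains l = true
    · have hi := h.2.2 l hcon
      have hstep : aRow ltid idtl cnt cur (l :: rest)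
          = aRow ltid idtl cnt
              ((if (cur.length : Int) ≤ ltid.getD l 0 then
                  cur ++ List.replicate (ltid.getD l 0 + 1 - cur.length).toNat 0 else cur).set
                (ltid.getD l 0).toNat 1) rest := by
        simp [aRow, hcon]
      have hb : bDictRow ltid idtl cnt (l :: rest) = bDictRow ltid idtl cnt rest := by
        simp [bDictRow, hcon]
      have hlen2 : ((if (cur.length : Int) ≤ ltid.getD l 0 then
          cur ++ List.replicate (ltid.getD l 0 + 1 - cur.length).toNat 0 else cur).set
            (ltid.getD l 0).toNat 1).length ≤ cnt.toNat := by
        by_cases hle : (cur.length : Int) ≤ ltid.getD l 0 <;> simp [hle] <;> omega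
      obtain ⟨ihlen, ihpad⟩ := ih _ _ _ _ h hlen2
      rw [hstep, hb]
      refine ⟨ihlen, fun N hN => ?_⟩
      rw [ihpad N hN]
      have hext := bDictRow_ext rest ltid idtl cnt
      have hgd : (bDictRow ltid idtl cnt rest).1.getD l 0 = ltid.getD l 0 :=
        (hext.2 l hcon).2
      rw [bVec, hgd]
      congr 1
      exact padTo_set N cur (ltid.getD l 0) hi.1
        (by have := hext.1; omega) (by have := hext.1; omega)
    · have hf : ltid.contains l = false := by simpa using hcon
      have hstep : aRow ltid idtl cnt cur (l :: rest)
          = aRow (ltid.insert l cnt) (idtl.insert cnt l) (cnt + 1)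
              ((if (cur.length : Int) ≤ cnt then
                  cur ++ List.replicate (cnt + 1 - cur.length).toNat 0 else cur).set
                cnt.toNat 1) rest := by
        simp [aRow, hf, PySem.Dict.getD_insert_self]
      have hb : bDictRow ltid idtl cnt (l :: rest)
          = bDictRow (ltid.insert l cnt) (idtl.insert cnt l) (cnt + 1) rest := by
        simp [bDictRow, hf]
      have h' := pvInv_insert ltid cnt l h hf
      have hlen2 : ((if (cur.length : Int) ≤ cnt then
          cur ++ List.replicate (cnt + 1 - cur.length).toNat 0 else cur).set
            cnt.toNat 1).length ≤ (cnt + 1).toNat := by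
        by_cases hle : (cur.length : Int) ≤ cnt <;> simp [hle] <;> omega
      obtain ⟨ihlen, ihpad⟩ := ih _ _ _ _ h' hlen2
      rw [hstep, hb]
      refine ⟨ihlen, fun N hN => ?_⟩
      rw [ihpad N hN]
      have hext := bDictRow_ext rest (ltid.insert l cnt) (idtl.insert cnt l) (cnt + 1)
      have hgd : (bDictRow (ltid.insert l cnt) (idtl.insert cnt l) (cnt + 1) rest).1.getD l 0 = cnt := by
        rw [(hext.2 l (PySem.Dict.contains_insert_self _ _ _)).2, PySem.Dict.getD_insert_self]
      rw [bVec, hgd]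
      congr 1
      exact padTo_set N cur cnt h.1
        (by have := hext.1; have := h.1; omega) (by have := hext.1; have := h.1; omega)

theorem aRows_main (rows : List (List String)) (ltid : PySem.Dict String Int) (idtl : PySem.Dict Int String) (cnt : Int) (h : pvInv ltid cnt) (mat : List (List Int)) :
    ((aRows ltid idtl cnt mat rows).1, (aRows ltid idtl cnt mat rows).2.1,
      (aRows ltid idtl cnt mat rows).2.2.1) = bDict ltid idtl cnt rows ∧
    ∃ L, (aRows ltid idtl cnt mat rows).2.2.2 = mat ++ L ∧
      (∀ r ∈ L, r.length ≤ (bDict ltid idtl cnt rows).2.2.toNat) ∧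
      ∀ N, (bDict ltid idtl cnt rows).2.2.toNat ≤ N →
        L.map (padTo N) = rows.map (fun row => bVec (bDict ltid idtl cnt rows).1 (List.replicate N 0) row) := by
  induction rows generalizing ltid idtl cnt mat with
  | nil => exact ⟨rfl, [], by simp [aRows], by simp, fun N _ => rfl⟩
  | cons row rest ih =>
    have hd := aRow_dicts row ltid idtl cnt []
    have e1 : (aRow ltid idtl cnt [] row).1 = (bDictRow ltid idtl cnt row).1 := by rw [← hd]
    have e2 : (aRow ltid idtl cnt [] row).2.1 = (bDictRow ltid idtl cnt row).2.1 := by rw [← hd]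
    have e3 : (aRow ltid idtl cnt [] row).2.2.1 = (bDictRow ltid idtl cnt row).2.2 := by rw [← hd]
    have hInv' := bDictRow_inv row ltid idtl cnt h
    have hextR := bDict_ext rest (bDictRow ltid idtl cnt row).1 (bDictRow ltid idtl cnt row).2.1 (bDictRow ltid idtl cnt row).2.2
    obtain ⟨ihd, L', hmat, hlenL, hmap⟩ :=
      ih (bDictRow ltid idtl cnt row).1 (bDictRow ltid idtl cnt row).2.1
        (bDictRow ltid idtl cnt row).2.2 hInv'
        (mat ++ [(aRow ltid idtl cnt [] row).2.2.2])
    obtain ⟨hlenA, hpadA⟩ := aRow_main row ltid idtl cnt [] h (by simp)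
    refine ⟨?_, (aRow ltid idtl cnt [] row).2.2.2 :: L', ?_, ?_, ?_⟩
    · simp only [aRows, bDict, e1, e2, e3]
      exact ihd
    · simp only [aRows, e1, e2, e3] at hmat ⊢
      rw [hmat]; simp
    · intro r hr
      show r.length ≤ (bDict (bDictRow ltid idtl cnt row).1 (bDictRow ltid idtl cnt row).2.1
        (bDictRow ltid idtl cnt row).2.2 rest).2.2.toNat
      rcases List.mem_cons.1 hr with rfl | hmem
      · have h1 := hextR.1
        have h2 := hInv'.1
        have h3 := hlenA
        omega
      · exact hlenL r hmem
    · intro N hN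
      simp only [bDict] at hmap hN ⊢
      rw [List.map_cons, List.map_cons, hmap N hN]
      have hN' : (bDictRow ltid idtl cnt row).2.2.toNat ≤ N := by
        have h1 := hextR.1
        have h2 := hInv'.1
        omega
      have hpad0 : padTo N ([] : List Int) = List.replicate N 0 := by simp [padTo]
      rw [hpadA N hN', hpad0]
      congr 1
      exact bVec_congr row _ _ _ (fun l hl =>
        (hextR.2 l (bDictRow_contains row ltid idtl cnt l hl)).2.symm)

-- ===== VERDICT (by name: the statement is the Claim_ definition above) =====
theorem transform_labels_spec : Claim_equal_transform_labels := by
  intro in_labels _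
  unfold Spec_transform_labels
  have hInv0 : pvInv PySem.Dict.empty 0 := by
    refine ⟨le_refl 0, by simp [PySem.Dict.size_empty], fun l hl => ?_⟩
    rw [PySem.Dict.contains_empty] at hl
    cases hl
  obtain ⟨hd, L, hmat, hlen, hmap⟩ :=
    aRows_main in_labels PySem.Dict.empty PySem.Dict.empty 0 hInv0 []
  have e1 : (aRows PySem.Dict.empty PySem.Dict.empty 0 [] in_labels).1
      = (bDict PySem.Dict.empty PySem.Dict.empty 0 in_labels).1 := by rw [← hd]
  have e2 : (aRows PySem.Dict.empty PySem.Dict.empty 0 [] in_labels).2.1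
      = (bDict PySem.Dict.empty PySem.Dict.empty 0 in_labels).2.1 := by rw [← hd]
  have hsize : (bDict PySem.Dict.empty PySem.Dict.empty 0 in_labels).1.size
      = (bDict PySem.Dict.empty PySem.Dict.empty 0 in_labels).2.2.toNat :=
    (bDict_inv in_labels PySem.Dict.empty PySem.Dict.empty 0 hInv0).2.1
  simp only [transform_labels, transform_labels_alt, e1, e2]
  refine Prod.ext ?_ rfl
  simp only []
  rw [hmat, List.nil_append]
  rw [← hmap (bDict PySem.Dict.empty PySem.Dict.empty 0 in_labels).2.2.toNat (le_refl _)]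
  apply List.map_congr_left
  intro r hr
  have hrl := hlen r hr
  rw [hsize]
  unfold padTo
  split_ifs with hless
  · rfl
  · have : (bDict PySem.Dict.empty PySem.Dict.empty 0 in_labels).2.2.toNat - r.length = 0 := by omega
    rw [this]
    simp
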